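-- pv_equiv track=rewrite | github.com/zmovirzynski/TTT-Tibia-TFS | ttt/converters/lua_transformer.py | _is_in_string_or_comment
-- ===== SOURCE A (Python) =====
-- def _is_in_string_or_comment(code: str, pos: int) -> bool:
--     line_start = code.rfind("\n", 0, pos)
--     if line_start == -1:
--         line_start = 0
--     else:
--         line_start += 1
--
--     line_text = code[line_start:pos]
--
--     in_string = None
--     for i, ch in enumerate(line_text):
--         if in_string:
--             if ch == "\\" and i + 1 < len(line_text):
--                 continue
--             if ch == in_string:
--                 in_string = None
--             continue
--
--         if ch in ('"', "'"):
--             in_string = ch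
--             continue
--
--         if ch == "-" and i + 1 < len(line_text) and line_text[i + 1] == "-":
--             return True
--
--     return in_string is not None
-- ===== SOURCE B (Python) =====
-- def _first_hit(*positions):
--     found = [p for p in positions if p != -1]
--     return min(found) if found else -1
--
--
-- def _is_in_string_or_comment(code: str, pos: int) -> bool:
--     line_start = code.rfind("\n", 0, pos)
--     line_start = 0 if line_start == -1 else line_start + 1
--     line_text = code[line_start:pos]
--
--     n = len(line_text)
--     i = 0
--     in_string = None
--     while i < n:
--         if in_string is None:
--             m = _first_hit(line_text.find('"', i),
--                            line_text.find("'", i),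
--                            line_text.find("--", i))
--             if m == -1:
--                 break
--             if line_text[m] == "-":
--                 return True
--             in_string = line_text[m]
--             i = m + 1
--         else:
--             q = line_text.find(in_string, i)
--             if q == -1:
--                 break
--             in_string = None
--             i = q + 1
--     return in_string is not None
-- ===== Notes on version B (the rewrite author's own statement) =====
-- stated objective: faster
-- what changed: Replaced A's per-character state-machine loop over the line with a find-jumping scan that repeatedly jumps straight to the earliest next quote or '--' occurrence (str.find), opening/closing strings at those hit points only.
import Mathlib
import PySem

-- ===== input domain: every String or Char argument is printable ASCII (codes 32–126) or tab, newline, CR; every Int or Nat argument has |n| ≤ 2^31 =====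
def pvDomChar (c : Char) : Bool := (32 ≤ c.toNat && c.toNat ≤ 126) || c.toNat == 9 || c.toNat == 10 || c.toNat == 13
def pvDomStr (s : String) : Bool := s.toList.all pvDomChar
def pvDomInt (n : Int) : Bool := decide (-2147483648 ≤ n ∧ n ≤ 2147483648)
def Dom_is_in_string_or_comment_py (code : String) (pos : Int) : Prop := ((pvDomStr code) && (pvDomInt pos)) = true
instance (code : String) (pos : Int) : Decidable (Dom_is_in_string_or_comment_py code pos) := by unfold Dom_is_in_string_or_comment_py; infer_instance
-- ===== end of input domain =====

-- B replaces A's char-by-char state loop over the line with a find-jumping scan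
-- (jump straight to the next quote / '--' occurrence); equivalence of return values is proved.

-- ===== PORT A =====
-- the 'for i, ch in enumerate(line_text)' loop of A, as index recursion over the same state
def pvALoop (text : List Char) : List Char → Nat → Option Char → Bool
  | [], _, st => st.isSome
  | ch :: rest, i, st =>
    match st with
    | some q =>
      if ch = '\\' ∧ i + 1 < text.length then pvALoop text rest (i+1) (some q)
      else if ch = q then pvALoop text rest (i+1) none
      else pvALoop text rest (i+1) (some q)
    | none =>
      if ch = '"' ∨ ch = '\'' then pvALoop text rest (i+1) (some ch)
      else if ch = '-' ∧ i + 1 < text.length ∧ text.getD (i+1) ch = '-' then true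
      else pvALoop text rest (i+1) none

def is_in_string_or_comment_py (code : String) (pos : Int) : Bool :=
  let ls := PySem.Str.rfindFrom code "\n" 0 (some pos)
  let lineStart : Int := if ls = -1 then 0 else ls + 1
  let lineText := (PySem.Str.slice code (some lineStart) (some pos)).toList
  pvALoop lineText lineText 0 none

-- ===== PORT B =====
-- port of _first_hit: min of the positions that are not -1, else -1
def pvFirstHit (p1 p2 p3 : Int) : Int :=
  match ([p1, p2, p3].filter (· ≠ -1)).min? with
  | some m => m
  | none => -1

-- the while loop of B; fuel only makes the jumping loop total (i strictly increases)
def pvBLoop (text : List Char) : Nat → Nat → Option Char → Bool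
  | 0, _, st => st.isSome
  | fuel+1, i, st =>
    if i < text.length then
      match st with
      | none =>
        let m := pvFirstHit (PySem.Chars.findFrom text ['"'] (i : Int))
                            (PySem.Chars.findFrom text ['\''] (i : Int))
                            (PySem.Chars.findFrom text ['-', '-'] (i : Int))
        if m = -1 then false
        else if text.getD m.toNat ' ' = '-' then true
        else pvBLoop text fuel (m.toNat + 1) (some (text.getD m.toNat ' '))
      | some q =>
        let p := PySem.Chars.findFrom text [q] (i : Int)
        if p = -1 then true
        else pvBLoop text fuel (p.toNat + 1) none
    else st.isSome

def is_in_string_or_comment_py_alt (code : String) (pos : Int) : Bool :=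
  let ls := PySem.Str.rfindFrom code "\n" 0 (some pos)
  let lineStart : Int := if ls = -1 then 0 else ls + 1
  let lineText := (PySem.Str.slice code (some lineStart) (some pos)).toList
  pvBLoop lineText lineText.length 0 none

-- ===== PRECONDITION & SPEC =====
def Spec_is_in_string_or_comment_py (code : String) (pos : Int) (out : Bool) : Prop := out = is_in_string_or_comment_py_alt code pos
instance (code : String) (pos : Int) (out : Bool) : Decidable (Spec_is_in_string_or_comment_py code pos out) := by unfold Spec_is_in_string_or_comment_py; infer_instance

-- ===== CLAIM (what is proved, stated in full; the proofs are below) =====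
def Claim_equal_is_in_string_or_comment_py : Prop := ∀ (code : String) (pos : Int), Dom_is_in_string_or_comment_py code pos → Spec_is_in_string_or_comment_py code pos (is_in_string_or_comment_py code pos)

-- ===== LEMMAS AND PROOFS =====

lemma pvALoop_terminal (text : List Char) (i : Nat) (st : Option Char) (h : text.length ≤ i) :
    pvALoop text (text.drop i) i st = st.isSome := by
  rw [List.drop_eq_nil_of_le h]; rfl

lemma prefix_single_iff (text : List Char) (c : Char) (k : Nat) :
    [c] <+: text.drop k ↔ text[k]? = some c := by
  constructor
  · intro hp
    rcases List.cons_prefix_iff.mp hp with ⟨l', hl', -⟩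
    have hk : k < text.length := by
      have := congrArg List.length hl'
      simp [List.length_drop] at this
      omega
    rw [List.drop_eq_getElem_cons hk] at hl'
    have : text[k] = c := (List.cons.injEq _ _ _ _).mp hl' |>.1
    simp [hk, this]
  · intro h
    rcases List.getElem?_eq_some_iff.mp h with ⟨hk, hv⟩
    rw [List.drop_eq_getElem_cons hk, hv]
    exact List.cons_prefix_iff.mpr ⟨_, rfl, List.nil_prefix⟩

lemma prefix_dd_iff (text : List Char) (k : Nat) :
    ['-', '-'] <+: text.drop k ↔ text[k]? = some '-' ∧ text[k+1]? = some '-' := by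
  constructor
  · intro hp
    rcases List.cons_prefix_iff.mp hp with ⟨l', hl', h2⟩
    have h0 : text[k]? = some '-' :=
      (prefix_single_iff text '-' k).mp (List.IsPrefix.trans ⟨['-'], rfl⟩ hp)
    have hk : k < text.length := (List.getElem?_eq_some_iff.mp h0).1
    rw [List.drop_eq_getElem_cons hk] at hl'
    have hl'' : text.drop (k+1) = l' := ((List.cons.injEq _ _ _ _).mp hl').2
    refine ⟨h0, (prefix_single_iff text '-' (k+1)).mp ?_⟩
    rw [hl'']; exact h2
  · rintro ⟨h0, h1⟩
    rcases List.getElem?_eq_some_iff.mp h0 with ⟨hk, hv0⟩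
    rcases List.getElem?_eq_some_iff.mp h1 with ⟨hk1, hv1⟩
    rw [List.drop_eq_getElem_cons hk, List.drop_eq_getElem_cons hk1, hv0, hv1]
    exact List.cons_prefix_iff.mpr ⟨_, rfl,
      List.cons_prefix_iff.mpr ⟨_, rfl, List.nil_prefix⟩⟩

lemma ff_none (text sub : List Char) (k : Nat) (hk : k ≤ text.length)
    (h : PySem.Chars.findFrom text sub (k : Int) = -1) :
    ∀ j, k ≤ j → ¬ sub <+: text.drop j := by
  intro j hj hpre
  have hinf : sub <:+: text.drop k := by
    have hd : sub <+: (text.drop k).drop (j - k) := by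
      rw [List.drop_drop]
      rw [show k + (j - k) = j by omega]; exact hpre
    exact hd.isInfix.trans (List.drop_suffix _ _).isInfix
  exact (PySem.Chars.findFrom_natCast_eq_neg_one_iff text sub k hk).mp h hinf

lemma ff_spec (text sub : List Char) (k : Nat) (hk : k ≤ text.length)
    (h : PySem.Chars.findFrom text sub (k : Int) ≠ -1) :
    (k : Int) ≤ PySem.Chars.findFrom text sub (k : Int) ∧
    sub <+: text.drop (PySem.Chars.findFrom text sub (k : Int)).toNat ∧
    ∀ j, k ≤ j → j < (PySem.Chars.findFrom text sub (k : Int)).toNat → ¬ sub <+: text.drop j :=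
  PySem.Chars.findFrom_natCast_spec text sub k hk h

lemma fh_spec (a b c : Int) :
    (pvFirstHit a b c = -1 ∧ a = -1 ∧ b = -1 ∧ c = -1) ∨
    (pvFirstHit a b c ≠ -1 ∧ (pvFirstHit a b c = a ∨ pvFirstHit a b c = b ∨ pvFirstHit a b c = c) ∧
      (a ≠ -1 → pvFirstHit a b c ≤ a) ∧ (b ≠ -1 → pvFirstHit a b c ≤ b) ∧ (c ≠ -1 → pvFirstHit a b c ≤ c)) := by
  by_cases ha : a = -1 <;> by_cases hb : b = -1 <;> by_cases hc : c = -1 <;>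
    simp [pvFirstHit, ha, hb, hc, List.min?, min_def] <;> split_ifs <;> omega

lemma aLoop_skip_none (text : List Char) :
    ∀ (d i : Nat), i + d ≤ text.length →
    (∀ k, i ≤ k → k < i + d →
      ¬ ['"'] <+: text.drop k ∧ ¬ ['\''] <+: text.drop k ∧ ¬ ['-', '-'] <+: text.drop k) →
    pvALoop text (text.drop i) i none = pvALoop text (text.drop (i + d)) (i + d) none := by
  intro d
  induction d with
  | zero => intro i _ _; rfl
  | succ d ih =>
    intro i hlen hno
    have hi : i < text.length := by omega
    obtain ⟨hq1, hq2, hdd⟩ := hno i (le_refl i) (by omega)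
    have hg : text[i]? = some text[i] := List.getElem?_eq_getElem hi
    have hch1 : ¬ (text[i] = '"' ∨ text[i] = '\'') := by
      rintro (h | h)
      · exact hq1 ((prefix_single_iff text '"' i).mpr (by rw [hg, h]))
      · exact hq2 ((prefix_single_iff text '\'' i).mpr (by rw [hg, h]))
    have hcond2 : ¬ (text[i] = '-' ∧ i + 1 < text.length ∧ text.getD (i+1) text[i] = '-') := by
      rintro ⟨h0, h1, h2⟩
      apply hdd
      rw [prefix_dd_iff]
      rw [List.getD_eq_getElem text _ h1] at h2
      exact ⟨by rw [hg, h0], by rw [List.getElem?_eq_getElem h1, h2]⟩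
    have hstep : pvALoop text (text.drop i) i none = pvALoop text (text.drop (i+1)) (i+1) none := by
      rw [List.drop_eq_getElem_cons hi, pvALoop]
      rw [if_neg hch1, if_neg hcond2]
    rw [hstep, ih (i+1) (by omega) (fun k hk1 hk2 => hno k (by omega) (by omega)),
      show i+1+d = i+(d+1) from by omega]

lemma aLoop_skip_some (text : List Char) (q : Char) :
    ∀ (d i : Nat), i + d ≤ text.length →
    (∀ k, i ≤ k → k < i + d → ¬ [q] <+: text.drop k) →
    pvALoop text (text.drop i) i (some q) = pvALoop text (text.drop (i + d)) (i + d) (some q) := by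
  intro d
  induction d with
  | zero => intro i _ _; rfl
  | succ d ih =>
    intro i hlen hno
    have hi : i < text.length := by omega
    have hne : text[i] ≠ q := by
      intro h
      exact hno i (le_refl i) (by omega)
        ((prefix_single_iff text q i).mpr (by rw [List.getElem?_eq_getElem hi, h]))
    have hstep : pvALoop text (text.drop i) i (some q) = pvALoop text (text.drop (i+1)) (i+1) (some q) := by
      rw [List.drop_eq_getElem_cons hi, pvALoop]
      by_cases hbs : text[i] = '\\' ∧ i + 1 < text.length
      · rw [if_pos hbs]
      · rw [if_neg hbs, if_neg hne]
    rw [hstep, ih (i+1) (by omega) (fun k hk1 hk2 => hno k (by omega) (by omega)),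
      show i+1+d = i+(d+1) from by omega]

lemma aLoop_quote (text : List Char) (j : Nat) (h : j < text.length)
    (hq : text[j] = '"' ∨ text[j] = '\'') :
    pvALoop text (text.drop j) j none = pvALoop text (text.drop (j+1)) (j+1) (some text[j]) := by
  rw [List.drop_eq_getElem_cons h, pvALoop]; rw [if_pos hq]

lemma aLoop_comment (text : List Char) (j : Nat) (h : j + 1 < text.length)
    (h0 : text[j] = '-') (h1 : text[j+1]'(h) = '-') :
    pvALoop text (text.drop j) j none = true := by
  have hj : j < text.length := by omega
  rw [List.drop_eq_getElem_cons hj, pvALoop]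
  have hnq : ¬ (text[j] = '"' ∨ text[j] = '\'') := by rw [h0]; decide
  rw [if_neg hnq, if_pos ⟨h0, h, by rw [List.getD_eq_getElem text _ h]; exact h1⟩]

lemma aLoop_close (text : List Char) (q : Char) (j : Nat) (h : j < text.length)
    (hq : text[j] = q) (hnb : q ≠ '\\') :
    pvALoop text (text.drop j) j (some q) = pvALoop text (text.drop (j+1)) (j+1) none := by
  rw [List.drop_eq_getElem_cons h, pvALoop]
  have hbs : ¬ (text[j] = '\\' ∧ j + 1 < text.length) := by
    rintro ⟨hh, -⟩
    exact hnb (hq.symm.trans hh)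
  rw [if_neg hbs, if_pos hq]

lemma pvBLoop_succ_none (text : List Char) (fuel i : Nat) (h : i < text.length) :
    pvBLoop text (fuel+1) i none =
      (if pvFirstHit (PySem.Chars.findFrom text ['"'] (i : Int))
                     (PySem.Chars.findFrom text ['\''] (i : Int))
                     (PySem.Chars.findFrom text ['-', '-'] (i : Int)) = -1 then false
       else if text.getD (pvFirstHit (PySem.Chars.findFrom text ['"'] (i : Int))
                     (PySem.Chars.findFrom text ['\''] (i : Int))
                     (PySem.Chars.findFrom text ['-', '-'] (i : Int))).toNat ' ' = '-' then true
       else pvBLoop text fuel ((pvFirstHit (PySem.Chars.findFrom text ['"'] (i : Int))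
                     (PySem.Chars.findFrom text ['\''] (i : Int))
                     (PySem.Chars.findFrom text ['-', '-'] (i : Int))).toNat + 1)
              (some (text.getD (pvFirstHit (PySem.Chars.findFrom text ['"'] (i : Int))
                     (PySem.Chars.findFrom text ['\''] (i : Int))
                     (PySem.Chars.findFrom text ['-', '-'] (i : Int))).toNat ' '))) := by
  rw [pvBLoop]; rw [if_pos h]

lemma pvBLoop_succ_some (text : List Char) (fuel i : Nat) (q : Char) (h : i < text.length) :
    pvBLoop text (fuel+1) i (some q) =
      (if PySem.Chars.findFrom text [q] (i : Int) = -1 then true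
       else pvBLoop text fuel ((PySem.Chars.findFrom text [q] (i : Int)).toNat + 1) none) := by
  rw [pvBLoop]; rw [if_pos h]

lemma loops_eq (text : List Char) :
    ∀ (fuel i : Nat) (st : Option Char), text.length - i ≤ fuel → i ≤ text.length →
    (st = none ∨ ∃ q, st = some q ∧ (q = '"' ∨ q = '\'')) →
    pvBLoop text fuel i st = pvALoop text (text.drop i) i st := by
  intro fuel
  induction fuel with
  | zero =>
    intro i st hfuel hi _
    rw [pvALoop_terminal text i st (by omega)]
    rfl
  | succ fuel ih =>
    intro i st hfuel hi hst
    by_cases hlt : i < text.length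
    · rcases hst with hnone | ⟨q, hq, hqq⟩
      · subst hnone
        rw [pvBLoop_succ_none text fuel i hlt]
        rcases fh_spec (PySem.Chars.findFrom text ['"'] (i : Int))
            (PySem.Chars.findFrom text ['\''] (i : Int))
            (PySem.Chars.findFrom text ['-', '-'] (i : Int)) with
          ⟨hm1, ha, hb, hc⟩ | ⟨hm1, hmem, hla, hlb, hlc⟩
        · rw [if_pos hm1]
          rw [aLoop_skip_none text (text.length - i) i (by omega)
            (fun k hk1 hk2 => ⟨ff_none text _ i hi ha k hk1,
              ff_none text _ i hi hb k hk1, ff_none text _ i hi hc k hk1⟩)]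
          rw [pvALoop_terminal text _ none (by omega)]
          rfl
        · have hpd1 := fun hne => ff_spec text ['"'] i hi hne
          have hps1 := fun hne => ff_spec text ['\''] i hi hne
          have hpc1 := fun hne => ff_spec text ['-', '-'] i hi hne
          rw [if_neg hm1]
          set pd := PySem.Chars.findFrom text ['"'] (i : Int) with hpd
          set ps := PySem.Chars.findFrom text ['\''] (i : Int) with hps
          set pc := PySem.Chars.findFrom text ['-', '-'] (i : Int) with hpc
          set m := pvFirstHit pd ps pc with hmdef
          have hge : (i : Int) ≤ m := by
            rcases hmem with h | h | h
            · rw [h]; exact (hpd1 (h ▸ hm1)).1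
            · rw [h]; exact (hps1 (h ▸ hm1)).1
            · rw [h]; exact (hpc1 (h ▸ hm1)).1
          have hnos : ∀ k, i ≤ k → k < m.toNat →
              ¬ ['"'] <+: text.drop k ∧ ¬ ['\''] <+: text.drop k ∧ ¬ ['-', '-'] <+: text.drop k := by
            intro k hk1 hk2
            refine ⟨?_, ?_, ?_⟩
            · by_cases hx : pd = -1
              · exact ff_none text _ i hi hx k hk1
              · exact (hpd1 hx).2.2 k hk1 (by have := hla hx; omega)
            · by_cases hx : ps = -1
              · exact ff_none text _ i hi hx k hk1
              · exact (hps1 hx).2.2 k hk1 (by have := hlb hx; omega)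
            · by_cases hx : pc = -1
              · exact ff_none text _ i hi hx k hk1
              · exact (hpc1 hx).2.2 k hk1 (by have := hlc hx; omega)
          rcases hmem with h | h | h
          · have hne : pd ≠ -1 := h ▸ hm1
            have hj : text[m.toNat]? = some '"' := by
              rw [h]; exact (prefix_single_iff text '"' pd.toNat).mp (hpd1 hne).2.1
            rcases List.getElem?_eq_some_iff.mp hj with ⟨hjlt, hjval⟩
            have hgd : text.getD m.toNat ' ' = '"' := by
              rw [List.getD_eq_getElem text _ hjlt]; exact hjval
            rw [if_neg (by rw [hgd]; decide)]
            rw [aLoop_skip_none text (m.toNat - i) i (by omega)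
              (fun k hk1 hk2 => hnos k hk1 (by omega))]
            rw [show i + (m.toNat - i) = m.toNat by omega]
            rw [aLoop_quote text m.toNat hjlt (Or.inl hjval), hgd, hjval]
            exact ih (m.toNat + 1) (some '"') (by omega) (by omega)
              (Or.inr ⟨'"', rfl, Or.inl rfl⟩)
          · have hne : ps ≠ -1 := h ▸ hm1
            have hj : text[m.toNat]? = some '\'' := by
              rw [h]; exact (prefix_single_iff text '\'' ps.toNat).mp (hps1 hne).2.1
            rcases List.getElem?_eq_some_iff.mp hj with ⟨hjlt, hjval⟩
            have hgd : text.getD m.toNat ' ' = '\'' := by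
              rw [List.getD_eq_getElem text _ hjlt]; exact hjval
            rw [if_neg (by rw [hgd]; decide)]
            rw [aLoop_skip_none text (m.toNat - i) i (by omega)
              (fun k hk1 hk2 => hnos k hk1 (by omega))]
            rw [show i + (m.toNat - i) = m.toNat by omega]
            rw [aLoop_quote text m.toNat hjlt (Or.inr hjval), hgd, hjval]
            exact ih (m.toNat + 1) (some '\'') (by omega) (by omega)
              (Or.inr ⟨'\'', rfl, Or.inr rfl⟩)
          · have hne : pc ≠ -1 := h ▸ hm1
            have hdd : text[m.toNat]? = some '-' ∧ text[m.toNat + 1]? = some '-' := by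
              rw [h]; exact (prefix_dd_iff text pc.toNat).mp (hpc1 hne).2.1
            rcases hdd with ⟨hj0, hj1⟩
            rcases List.getElem?_eq_some_iff.mp hj0 with ⟨hjlt, hjval⟩
            rcases List.getElem?_eq_some_iff.mp hj1 with ⟨hjlt1, hjval1⟩
            have hgd : text.getD m.toNat ' ' = '-' := by
              rw [List.getD_eq_getElem text _ hjlt]; exact hjval
            rw [if_pos hgd]
            rw [aLoop_skip_none text (m.toNat - i) i (by omega)
              (fun k hk1 hk2 => hnos k hk1 (by omega))]
            rw [show i + (m.toNat - i) = m.toNat by omega]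
            rw [aLoop_comment text m.toNat hjlt1 hjval hjval1]
      · subst hq
        rw [pvBLoop_succ_some text fuel i q hlt]
        by_cases hp : PySem.Chars.findFrom text [q] (i : Int) = -1
        · rw [if_pos hp]
          rw [aLoop_skip_some text q (text.length - i) i (by omega)
            (fun k hk1 hk2 => ff_none text [q] i hi hp k hk1)]
          rw [pvALoop_terminal text _ (some q) (by omega)]
          rfl
        · rw [if_neg hp]
          obtain ⟨hge, hpre, hmin⟩ := ff_spec text [q] i hi hp
          set p := PySem.Chars.findFrom text [q] (i : Int) with hpdef
          have hij : i ≤ p.toNat := by omega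
          have hjv : text[p.toNat]? = some q := (prefix_single_iff text q p.toNat).mp hpre
          rcases List.getElem?_eq_some_iff.mp hjv with ⟨hjlt, hjval⟩
          rw [aLoop_skip_some text q (p.toNat - i) i (by omega)
            (fun k hk1 hk2 => hmin k hk1 (by omega))]
          have heq : i + (p.toNat - i) = p.toNat := by omega
          rw [heq]
          rw [aLoop_close text q p.toNat hjlt hjval
            (by rcases hqq with h | h <;> rw [h] <;> decide)]
          exact ih (p.toNat + 1) none (by omega) (by omega) (Or.inl rfl)
    · rw [pvALoop_terminal text i st (by omega)]
      rcases st with _ | q <;> rw [pvBLoop, if_neg hlt]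

lemma entry_eq (text : List Char) : pvBLoop text text.length 0 none = pvALoop text text 0 none := by
  have h := loops_eq text text.length 0 none (Nat.sub_le _ _) (Nat.zero_le _) (Or.inl rfl)
  rw [List.drop_zero] at h
  exact h

-- ===== VERDICT (by name: the statement is the Claim_ definition above) =====
theorem is_in_string_or_comment_py_spec : Claim_equal_is_in_string_or_comment_py := by
  intro code pos _
  unfold Spec_is_in_string_or_comment_py is_in_string_or_comment_py is_in_string_or_comment_py_alt
  exact (entry_eq _).symm
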